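-- pv_equiv track=rewrite | github.com/husseinsd1/Sorting-Algorithm-Visualizer | merge_sort.py | get_bar_color
-- ===== SOURCE A (Python) =====
-- def get_bar_color(length, left, middle, right):
--     """Sets the color of the bar based on certain criteria."""
--
--     bar_color = []
--
--     # Color of current 2 elements being used, and element not being used (in that order).
--     for i in range(length):
--
--         if left <= i <= right:
--             if i <= middle:
--                 bar_color.append('yellow')
--             else:
--                 bar_color.append('pink')
--
--         else:
--             bar_color.append('white')
--
--     return bar_color
-- ===== SOURCE B (Python) =====
-- def get_bar_color(length, left, middle, right):
--     """Sets the color of the bar based on certain criteria."""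
--     res = ['white'] * length
--     n = len(res)
--     ya = max(0, left)
--     yb = min(middle, right, n - 1)
--     if ya <= yb:
--         res[ya:yb + 1] = ['yellow'] * (yb - ya + 1)
--     pa = max(0, left, middle + 1)
--     pb = min(right, n - 1)
--     if pa <= pb:
--         res[pa:pb + 1] = ['pink'] * (pb - pa + 1)
--     return res
-- ===== Notes on version B (the rewrite author's own statement) =====
-- stated objective: simpler
-- what changed: Replaces the per-index conditional loop with a white base list plus two clamped contiguous slice assignments (yellow and pink segments) computed from boundary arithmetic.
import Mathlib
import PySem

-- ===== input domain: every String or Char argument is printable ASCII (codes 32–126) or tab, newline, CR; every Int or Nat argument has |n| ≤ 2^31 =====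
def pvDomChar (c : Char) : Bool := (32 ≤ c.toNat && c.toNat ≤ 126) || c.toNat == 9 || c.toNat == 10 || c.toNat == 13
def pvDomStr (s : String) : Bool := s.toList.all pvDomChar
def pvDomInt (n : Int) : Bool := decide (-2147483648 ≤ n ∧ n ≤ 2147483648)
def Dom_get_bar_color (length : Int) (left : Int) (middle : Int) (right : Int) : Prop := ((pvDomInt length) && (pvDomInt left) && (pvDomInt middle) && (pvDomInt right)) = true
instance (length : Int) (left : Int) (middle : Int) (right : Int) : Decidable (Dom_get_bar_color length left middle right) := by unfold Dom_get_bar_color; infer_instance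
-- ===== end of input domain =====

-- B replaces the per-index conditional loop by two clamped contiguous segment assignments over a white list (simpler decomposition; not claimed faster).


-- ===== PORT A =====
def get_bar_color (length : Int) (left : Int) (middle : Int) (right : Int) : List String :=
  (PySem.List.pyRange 0 length 1).foldl
    (fun bar_color i =>
      if left ≤ i ∧ i ≤ right then
        if i ≤ middle then bar_color ++ ["yellow"] else bar_color ++ ["pink"]
      else bar_color ++ ["white"]) []

-- ===== PORT B =====
-- slice assignment res[a:b+1] = [c]*(b-a+1); exact for 0 ≤ a ≤ b < len res, which B's clamped bounds guarantee
def pvFill (res : List String) (a b : Int) (c : String) : List String :=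
  if a ≤ b then res.take a.toNat ++ List.replicate (b - a + 1).toNat c ++ res.drop (b.toNat + 1)
  else res

def get_bar_color_alt (length : Int) (left : Int) (middle : Int) (right : Int) : List String :=
  let res := List.replicate length.toNat "white"
  let n : Int := (res.length : Int)
  let res := pvFill res (max 0 left) (min middle (min right (n - 1))) "yellow"
  let res := pvFill res (max 0 (max left (middle + 1))) (min right (n - 1)) "pink"
  res

-- ===== PRECONDITION & SPEC =====
def Spec_get_bar_color (length : Int) (left : Int) (middle : Int) (right : Int) (out : List String) : Prop := out = get_bar_color_alt length left middle right
instance (length : Int) (left : Int) (middle : Int) (right : Int) (out : List String) : Decidable (Spec_get_bar_color length left middle right out) := by unfold Spec_get_bar_color; infer_instance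

-- ===== CLAIM (what is proved, stated in full; the proofs are below) =====
def Claim_equal_get_bar_color : Prop := ∀ (length : Int) (left : Int) (middle : Int) (right : Int), Dom_get_bar_color length left middle right → Spec_get_bar_color length left middle right (get_bar_color length left middle right)

-- ===== LEMMAS AND PROOFS =====

def pvColor (left middle right i : Int) : String :=
  if left ≤ i ∧ i ≤ right then (if i ≤ middle then "yellow" else "pink") else "white"

theorem get_bar_color_eq_map (length left middle right : Int) :
    get_bar_color length left middle right
      = (List.range length.toNat).map (fun k : Nat => pvColor left middle right (k : Int)) := by
  unfold get_bar_color
  have hfun : (fun (bar_color : List String) (i : Int) =>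
      if left ≤ i ∧ i ≤ right then
        if i ≤ middle then bar_color ++ ["yellow"] else bar_color ++ ["pink"]
      else bar_color ++ ["white"])
      = fun bar_color i => bar_color ++ [pvColor left middle right i] := by
    funext bar_color i
    unfold pvColor
    split_ifs <;> rfl
  rw [hfun, PySem.List.foldl_append_singleton_eq_map, PySem.List.pyRange_one,
    List.map_map, List.nil_append]
  simp only [Int.sub_zero, Function.comp_def, zero_add]

theorem pvFill_length (res : List String) (a b : Int) (c : String)
    (ha : 0 ≤ a) (hb : b < (res.length : Int)) :
    (pvFill res a b c).length = res.length := by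
  unfold pvFill
  split_ifs with h
  · simp only [List.length_append, List.length_take, List.length_replicate, List.length_drop]
    omega
  · rfl

theorem pvFill_getElem (res : List String) (a b : Int) (c : String)
    (ha : 0 ≤ a) (hb : b < (res.length : Int)) (i : Nat) (hi : i < res.length) :
    (pvFill res a b c)[i]'(by rw [pvFill_length res a b c ha hb]; exact hi)
      = if a ≤ (i : Int) ∧ (i : Int) ≤ b then c else res[i] := by
  by_cases hab : a ≤ b
  · have htk : (res.take a.toNat).length = a.toNat := by simp; omega
    have hrp : (List.replicate (b - a + 1).toNat c).length = (b - a + 1).toNat := by simp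
    have hX : (res.take a.toNat ++ List.replicate (b - a + 1).toNat c).length
        = a.toNat + (b - a + 1).toNat := by rw [List.length_append, htk, hrp]
    simp only [pvFill, if_pos hab]
    by_cases hseg : a ≤ (i : Int) ∧ (i : Int) ≤ b
    · rw [if_pos hseg]
      rw [List.getElem_append_left (by rw [hX]; omega)]
      rw [List.getElem_append_right (by rw [htk]; omega)]
      simp
    · rw [if_neg hseg]
      rcases Nat.lt_or_ge i a.toNat with hlt | hge
      · rw [List.getElem_append_left (by rw [hX]; omega)]
        rw [List.getElem_append_left (by rw [htk]; omega)]
        simp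
      · have hgt : b < (i : Int) := by
          rcases Classical.em (a ≤ (i : Int)) with h1 | h1
          · by_contra hc; exact hseg ⟨h1, by omega⟩
          · omega
        rw [List.getElem_append_right (by rw [hX]; omega)]
        simp only [List.getElem_drop]
        congr 1
        rw [hX]
        omega
  · simp only [pvFill, if_neg hab]
    rw [if_neg (by rintro ⟨h1, h2⟩; omega)]

theorem get_bar_color_alt_eq_map (length left middle right : Int) :
    get_bar_color_alt length left middle right
      = (List.range length.toNat).map (fun k : Nat => pvColor left middle right (k : Int)) := by
  unfold get_bar_color_alt
  simp only []
  set n : Int := ((List.replicate length.toNat ("white" : String)).length : Int) with hn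
  have hnval : n = (length.toNat : Int) := by simp [hn]
  by_cases hlen : length.toNat = 0
  · -- empty result on both sides
    have h1 : (List.replicate length.toNat ("white" : String)) = [] := by simp [hlen]
    have hy := pvFill_length (List.replicate length.toNat ("white" : String))
      (max 0 left) (min middle (min right (n - 1))) "yellow"
    have hp := pvFill_length
      (pvFill (List.replicate length.toNat ("white" : String)) (max 0 left)
        (min middle (min right (n - 1))) "yellow")
      (max 0 (max left (middle + 1))) (min right (n - 1)) "pink"
    -- both fills are no-ops or preserve emptiness; easiest: show every pvFill of [] is [] or use lengths
    rw [h1]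
    have e1 : pvFill [] (max 0 left) (min middle (min right (n - 1))) "yellow" = [] := by
      unfold pvFill; rw [if_neg (by omega)]
    rw [e1]
    have e2 : pvFill [] (max 0 (max left (middle + 1))) (min right (n - 1)) "pink" = [] := by
      unfold pvFill; rw [if_neg (by omega)]
    rw [e2, hlen]
    simp
  · -- nonempty
    have hn0 : 0 < length.toNat := Nat.pos_of_ne_zero hlen
    have hblen : min middle (min right (n - 1)) < ((List.replicate length.toNat ("white" : String)).length : Int) := by
      simp; omega
    have ha1 : (0 : Int) ≤ max 0 left := le_max_left _ _
    have hyl := pvFill_length (List.replicate length.toNat ("white" : String))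
      (max 0 left) (min middle (min right (n - 1))) "yellow" ha1 hblen
    have ha2 : (0 : Int) ≤ max 0 (max left (middle + 1)) := le_max_left _ _
    have hblen2 : min right (n - 1) < ((pvFill (List.replicate length.toNat ("white" : String)) (max 0 left)
        (min middle (min right (n - 1))) "yellow").length : Int) := by
      rw [hyl]; simp; omega
    have hpl := pvFill_length _ (max 0 (max left (middle + 1))) (min right (n - 1)) "pink" ha2 hblen2
    apply List.ext_getElem
    · rw [hpl, hyl]; simp
    · intro i hi1 hi2
      have hi : i < length.toNat := by
        rw [hpl, hyl] at hi1; simpa using hi1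
      rw [pvFill_getElem _ _ _ _ ha2 hblen2 i (by rw [hyl]; simpa using hi)]
      rw [pvFill_getElem _ _ _ _ ha1 hblen i (by simpa using hi)]
      simp only [List.getElem_map, List.getElem_range, List.getElem_replicate]
      unfold pvColor
      have hiZ : (i : Int) < (length.toNat : Int) := by exact_mod_cast hi
      have hnn : (0 : Int) ≤ (i : Int) := Int.natCast_nonneg i
      split_ifs <;> first | rfl | omega

-- ===== VERDICT (by name: the statement is the Claim_ definition above) =====
theorem get_bar_color_spec : Claim_equal_get_bar_color := by
  intro length left middle right _
  unfold Spec_get_bar_color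
  rw [get_bar_color_eq_map, get_bar_color_alt_eq_map]
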